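-- pv_equiv track=rewrite | github.com/Hrabikv/Diploma_thesis | classification/Cross_Validation.py | split_data_to_classes
-- ===== SOURCE A (Python) =====
-- def split_data_to_classes(data, labels):
--     number_of_classes = 3
--     new_data = []
--     new_labels = []
--     for classes in range(number_of_classes):
--         new_data.append([])
--         new_labels.append([])
--
--     for sample, label in zip(data, labels):
--
--         if label == 2:
--             new_data[0].append(sample)
--             new_labels[0].append(label)
--         elif label == 5:
--             new_data[1].append(sample)
--             new_labels[1].append(label)
--         elif label == 6:
--             new_data[2].append(sample)
--             new_labels[2].append(label)
--
--     return new_data, new_labels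
-- ===== SOURCE B (Python) =====
-- def split_data_to_classes(data, labels):
--     targets = [2, 5, 6]
--     new_data = [[s for s, l in zip(data, labels) if l == t] for t in targets]
--     new_labels = [[l for s, l in zip(data, labels) if l == t] for t in targets]
--     return new_data, new_labels
-- ===== Notes on version B (the rewrite author's own statement) =====
-- stated objective: idiomatic
-- what changed: Replaced the one-pass index-dispatch loop into preallocated buckets by per-target list comprehensions over zip(data, labels), one filtered pass per class label in [2, 5, 6].
import Mathlib
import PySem

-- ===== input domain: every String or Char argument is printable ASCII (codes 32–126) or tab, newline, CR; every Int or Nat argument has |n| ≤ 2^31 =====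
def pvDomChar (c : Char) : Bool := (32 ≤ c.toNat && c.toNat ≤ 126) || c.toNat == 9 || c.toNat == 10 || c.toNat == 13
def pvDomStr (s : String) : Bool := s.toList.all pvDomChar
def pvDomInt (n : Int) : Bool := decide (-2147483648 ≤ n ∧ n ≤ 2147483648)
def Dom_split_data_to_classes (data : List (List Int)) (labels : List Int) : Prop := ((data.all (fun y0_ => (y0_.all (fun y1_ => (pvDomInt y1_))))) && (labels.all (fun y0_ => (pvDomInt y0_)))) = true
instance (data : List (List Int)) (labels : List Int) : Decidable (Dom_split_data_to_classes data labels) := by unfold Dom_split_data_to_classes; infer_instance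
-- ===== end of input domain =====

-- B replaces the one-pass index-dispatch loop by one filtered comprehension per target label (idiomatic; same cost).


-- ===== PORT A =====
def pvStepA (s : (List (List Int) × List (List Int) × List (List Int)) × (List Int × List Int × List Int))
    (p : List Int × Int) :
    (List (List Int) × List (List Int) × List (List Int)) × (List Int × List Int × List Int) :=
  if p.2 == 2 then ((s.1.1 ++ [p.1], s.1.2.1, s.1.2.2), (s.2.1 ++ [p.2], s.2.2.1, s.2.2.2))
  else if p.2 == 5 then ((s.1.1, s.1.2.1 ++ [p.1], s.1.2.2), (s.2.1, s.2.2.1 ++ [p.2], s.2.2.2))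
  else if p.2 == 6 then ((s.1.1, s.1.2.1, s.1.2.2 ++ [p.1]), (s.2.1, s.2.2.1, s.2.2.2 ++ [p.2]))
  else s

def split_data_to_classes (data : List (List Int)) (labels : List Int) : List (List (List Int)) × List (List Int) :=
  let st := (List.zip data labels).foldl pvStepA (([], [], []), ([], [], []))
  ([st.1.1, st.1.2.1, st.1.2.2], [st.2.1, st.2.2.1, st.2.2.2])

-- ===== PORT B =====
def split_data_to_classes_alt (data : List (List Int)) (labels : List Int) : List (List (List Int)) × List (List Int) :=
  let targets : List Int := [2, 5, 6]
  (targets.map (fun t => ((List.zip data labels).filter (fun p => p.2 == t)).map Prod.fst),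
   targets.map (fun t => ((List.zip data labels).filter (fun p => p.2 == t)).map Prod.snd))

-- ===== PRECONDITION & SPEC =====
def Spec_split_data_to_classes (data : List (List Int)) (labels : List Int) (out : List (List (List Int)) × List (List Int)) : Prop := out = split_data_to_classes_alt data labels
instance (data : List (List Int)) (labels : List Int) (out : List (List (List Int)) × List (List Int)) : Decidable (Spec_split_data_to_classes data labels out) := by unfold Spec_split_data_to_classes; infer_instance

-- ===== CLAIM (what is proved, stated in full; the proofs are below) =====
def Claim_equal_split_data_to_classes : Prop := ∀ (data : List (List Int)) (labels : List Int), Dom_split_data_to_classes data labels → Spec_split_data_to_classes data labels (split_data_to_classes data labels)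

-- ===== LEMMAS AND PROOFS =====
lemma pvLoopA_eq (ps : List (List Int × Int)) (a b c : List (List Int)) (x y z : List Int) :
    ps.foldl pvStepA ((a, b, c), (x, y, z)) =
      ((a ++ (ps.filter (fun p => p.2 == 2)).map Prod.fst,
        b ++ (ps.filter (fun p => p.2 == 5)).map Prod.fst,
        c ++ (ps.filter (fun p => p.2 == 6)).map Prod.fst),
       (x ++ (ps.filter (fun p => p.2 == 2)).map Prod.snd,
        y ++ (ps.filter (fun p => p.2 == 5)).map Prod.snd,
        z ++ (ps.filter (fun p => p.2 == 6)).map Prod.snd)) := by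
  induction ps generalizing a b c x y z with
  | nil => simp
  | cons p ps ih =>
    by_cases h2 : p.2 = 2
    · simp [pvStepA, h2, ih]
    · by_cases h5 : p.2 = 5
      · simp [pvStepA, h2, h5, ih]
      · by_cases h6 : p.2 = 6
        · simp [pvStepA, h2, h5, h6, ih]
        · simp [pvStepA, h2, h5, h6, ih]

-- ===== VERDICT (by name: the statement is the Claim_ definition above) =====
theorem split_data_to_classes_spec : Claim_equal_split_data_to_classes := by
  intro data labels _
  unfold Spec_split_data_to_classes split_data_to_classes split_data_to_classes_alt
  simp [pvLoopA_eq]
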